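-- pv_equiv track=rewrite | github.com/steveyoung-random/cassiel-legal-workbench | utils/text_processing.py | extract_trailing_paren
-- ===== SOURCE A (Python) =====
-- def extract_trailing_paren(input):
--     # Function to extract the contents of a trailing parenthetical (if any).
--     remainder_text = input
--     paren_text = ''
--     input = str(input).strip()
--     length = len(input)
--     location = length - 1
--     count = 0
--     if ')' == input[location]:
--         count = 1
--         while count > 0 and location > 0:
--             location -= 1
--             if ')' == input[location]:
--                 count += 1
--             elif '(' == input[location]:
--                 count -= 1
--     if 0 == count and location < length -1: # Found parenthetical.
--         remainder_text = input[:location]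
--         paren_text = input[location+1:length-1]
--     return remainder_text, paren_text
-- ===== SOURCE B (Python) =====
-- def extract_trailing_paren(input):
--     # Forward scan with a stack of opening-paren indices; open_idx is the
--     # partner of the last closing paren seen (or -1 if it had none).
--     s = str(input).strip()
--     stack = []
--     open_idx = -1
--     for i, ch in enumerate(s):
--         if ch == '(':
--             stack.append(i)
--         elif ch == ')':
--             open_idx = stack.pop() if stack else -1
--     if s and s[-1] == ')' and open_idx >= 0:
--         return s[:open_idx], s[open_idx + 1:-1]
--     return input, ''
-- ===== Notes on version B (the rewrite author's own statement) =====
-- stated objective: alternative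
-- what changed: B replaces A's backward balanced-paren counter walking from the final closing paren by a single forward scan maintaining a stack of opening-paren indices and taking the partner of the last closing paren seen.
import Mathlib
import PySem

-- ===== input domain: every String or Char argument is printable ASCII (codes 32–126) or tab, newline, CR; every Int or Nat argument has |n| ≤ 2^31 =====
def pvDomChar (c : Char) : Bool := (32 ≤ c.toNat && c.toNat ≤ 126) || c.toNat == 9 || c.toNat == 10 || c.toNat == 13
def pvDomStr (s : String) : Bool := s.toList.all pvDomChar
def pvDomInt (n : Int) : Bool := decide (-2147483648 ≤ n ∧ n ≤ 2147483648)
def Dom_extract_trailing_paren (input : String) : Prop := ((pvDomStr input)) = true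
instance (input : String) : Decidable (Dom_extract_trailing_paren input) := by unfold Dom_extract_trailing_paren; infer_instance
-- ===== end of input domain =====

-- B replaces A's backward balanced-paren counter by a forward index-stack scan (alternative
-- decomposition, same cost); return-value equivalence on all inputs that strip to a nonempty string.


-- ===== PORT A =====
-- the `while count > 0 and location > 0` loop; `cs.getD loc ' '` is `input[location]`, whose index
-- is always in range when the loop runs (0 ≤ loc < cs.length).
def aLoop (cs : List Char) (count : Nat) (location : Nat) : Nat × Nat :=
  if 0 < count ∧ 0 < location then
    let loc := location - 1
    let c := cs.getD loc ' '
    aLoop cs (if c = ')' then count + 1 else if c = '(' then count - 1 else count) loc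
  else (count, location)
termination_by location
decreasing_by omega

def extract_trailing_paren (input : String) : String × String :=
  let remainder_text := input
  let paren_text := ""
  let cs := (PySem.Str.strip input).toList
  let length := cs.length
  let location := length - 1
  -- `input[location]`: none exactly where Python raises IndexError (stripped string empty)
  match PySem.List.pyGet? cs ((length : Int) - 1) with
  | none => (remainder_text, paren_text)
  | some c =>
    let cl := if c = ')' then aLoop cs 1 location else (0, location)
    if cl.1 = 0 ∧ cl.2 < length - 1 then
      (String.ofList (PySem.List.slice cs none (some (cl.2 : Int))),
       String.ofList (PySem.List.slice cs (some ((cl.2 : Int) + 1)) (some ((length : Int) - 1))))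
    else (remainder_text, paren_text)

-- ===== PORT B =====
-- one forward fold step: push the index of an opener, pop on a closer recording the popped partner (or -1)
def bStep (st : List Int × Int) (p : Int × Char) : List Int × Int :=
  if p.2 = '(' then (p.1 :: st.1, st.2)
  else if p.2 = ')' then
    match st.1 with
    | [] => ([], -1)
    | j :: rest => (rest, j)
  else st

def extract_trailing_paren_alt (input : String) : String × String :=
  let cs := (PySem.Str.strip input).toList
  let st := (PySem.List.enumerate cs).foldl bStep ([], -1)
  let open_idx := st.2
  if cs ≠ [] ∧ cs.getLast? = some ')' ∧ 0 ≤ open_idx then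
    (String.ofList (PySem.List.slice cs none (some open_idx)),
     String.ofList (PySem.List.slice cs (some (open_idx + 1)) (some (-1))))
  else (input, "")

-- ===== PRECONDITION & SPEC =====
-- Pre_ excludes exactly the inputs that strip to the empty string, on which A raises IndexError.
def Pre_extract_trailing_paren (input : String) : Prop := (PySem.Str.strip input).toList ≠ []
instance (input : String) : Decidable (Pre_extract_trailing_paren input) := by
  unfold Pre_extract_trailing_paren; infer_instance
def pvWitness_extract_trailing_paren : String := " ab (cd) "


def Spec_extract_trailing_paren (input : String) (out : String × String) : Prop :=
  out = extract_trailing_paren_alt input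
instance (input : String) (out : String × String) : Decidable (Spec_extract_trailing_paren input out) := by
  unfold Spec_extract_trailing_paren; infer_instance

-- ===== CLAIM (what is proved, stated in full; the proofs are below) =====
def Claim_equal_extract_trailing_paren : Prop := ∀ (input : String), Dom_extract_trailing_paren input → Pre_extract_trailing_paren input → Spec_extract_trailing_paren input (extract_trailing_paren input)

-- ===== LEMMAS AND PROOFS =====

-- A's backward loop, reformulated as structural recursion over the reversed scanned prefix;
-- the second component is the number of still-unprocessed characters (= A's `location`).
def gRev : List Char → Nat → Nat × Nat
  | r, 0 => (0, r.length)
  | [], c + 1 => (c + 1, 0)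
  | x :: rest, c + 1 => gRev rest (if x = ')' then c + 2 else if x = '(' then c else c + 1)

lemma aLoop_succ (cs : List Char) (c l : Nat) :
    aLoop cs (c + 1) (l + 1) =
      aLoop cs (if cs.getD l ' ' = ')' then c + 2 else if cs.getD l ' ' = '(' then c else c + 1) l := by
  rw [aLoop]
  simp

lemma aLoop_eq_gRev (cs : List Char) :
    ∀ (location count : Nat), location ≤ cs.length →
      aLoop cs count location = gRev ((cs.take location).reverse) count := by
  intro location
  induction location with
  | zero =>
    intro count _
    rw [aLoop]
    cases count <;> simp [gRev]
  | succ l ih =>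
    intro count hle
    have hl : l < cs.length := by omega
    have htake : (cs.take (l + 1)).reverse = cs[l] :: (cs.take l).reverse := by
      rw [List.take_add_one]
      simp [hl]
    cases count with
    | zero =>
      rw [aLoop]
      simp [gRev, htake, List.length_take]
      omega
    | succ c =>
      have hget : cs.getD l ' ' = cs[l] := List.getD_eq_getElem cs ' ' hl
      rw [aLoop_succ, hget, htake]
      by_cases h1 : cs[l] = ')'
      · rw [if_pos h1]
        rw [show gRev (cs[l] :: (cs.take l).reverse) (c + 1)
              = gRev ((cs.take l).reverse) (c + 2) from by simp [gRev, h1]]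
        exact ih (c + 2) (by omega)
      · by_cases h2 : cs[l] = '('
        · rw [if_neg h1, if_pos h2]
          rw [show gRev (cs[l] :: (cs.take l).reverse) (c + 1)
                = gRev ((cs.take l).reverse) c from by simp [gRev, h2]]
          exact ih c (by omega)
        · rw [if_neg h1, if_neg h2]
          rw [show gRev (cs[l] :: (cs.take l).reverse) (c + 1)
                = gRev ((cs.take l).reverse) (c + 1) from by simp [gRev, h1, h2]]
          exact ih (c + 1) (by omega)

lemma enumerate_append_singleton (l : List Char) (x : Char) :
    ∀ s : Int, PySem.List.enumerate (l ++ [x]) s = PySem.List.enumerate l s ++ [(s + l.length, x)] := by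
  induction l with
  | nil => intro s; simp [PySem.List.enumerate_cons, PySem.List.enumerate_nil]
  | cons y ys ih =>
    intro s
    simp [PySem.List.enumerate_cons, ih (s + 1)]
    ring_nf

-- Main invariant: after processing l forward, the stack S holds the indices of the unmatched
-- openers (most recent first, all in range), and gRev on l.reverse started at count c finds the
-- c-th unmatched opener from the right (or runs off the left end, U = unmatched closers of l).
lemma stack_inv (l : List Char) :
    ∃ (S : List Int) (U : Nat) (oi : Int),
      (PySem.List.enumerate l).foldl bStep ([], -1) = (S, oi) ∧
      (∀ j ∈ S, 0 ≤ j ∧ j < (l.length : Int)) ∧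
      (∀ c : Nat, 1 ≤ c →
        gRev l.reverse c =
          if c ≤ S.length then (0, (S[c - 1]?.getD 0).toNat) else (c - S.length + U, 0)) := by
  induction l using List.reverseRecOn with
  | nil =>
    refine ⟨[], 0, -1, by simp [PySem.List.enumerate_nil], by simp, ?_⟩
    intro c hc
    obtain ⟨c, rfl⟩ : ∃ c', c = c' + 1 := ⟨c - 1, by omega⟩
    simp [gRev]
  | append_singleton l x ih =>
    obtain ⟨S, U, oi, hfold, hbd, hg⟩ := ih
    have henum : PySem.List.enumerate (l ++ [x]) =
        PySem.List.enumerate l ++ [((l.length : Int), x)] := by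
      simpa using enumerate_append_singleton l x 0
    have hfold' : (PySem.List.enumerate (l ++ [x])).foldl bStep ([], -1) =
        bStep (S, oi) ((l.length : Int), x) := by
      rw [henum, List.foldl_append, hfold]; simp
    by_cases h1 : x = '('
    · subst h1
      refine ⟨(l.length : Int) :: S, U, oi, by rw [hfold']; simp [bStep], ?_, ?_⟩
      · intro j hj
        rcases List.mem_cons.mp hj with h | h
        · subst h
          constructor
          · positivity
          · simp
            try omega
        · obtain ⟨ha, hb⟩ := hbd j h
          refine ⟨ha, ?_⟩
          simp
          omega
      · intro c hc
        obtain ⟨c, rfl⟩ : ∃ c', c = c' + 1 := ⟨c - 1, by omega⟩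
        rw [show gRev ((l ++ ['(']).reverse) (c + 1) = gRev l.reverse c from by simp [gRev]]
        cases c with
        | zero => simp [gRev]
        | succ c' =>
          rw [hg (c' + 1) (by omega)]
          by_cases hle : c' + 1 ≤ S.length
          · rw [if_pos hle, if_pos (by simp; omega)]
            simp
          · rw [if_neg hle, if_neg (by simp; omega)]
            simp
    · by_cases h2 : x = ')'
      · subst h2
        cases S with
        | nil =>
          refine ⟨[], U + 1, -1, by rw [hfold']; simp [bStep], by simp, ?_⟩
          intro c hc
          obtain ⟨c, rfl⟩ : ∃ c', c = c' + 1 := ⟨c - 1, by omega⟩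
          rw [show gRev ((l ++ [')']).reverse) (c + 1) = gRev l.reverse (c + 2) from by
            simp [gRev]]
          rw [hg (c + 2) (by omega)]
          rw [if_neg (by simp)]
          simp
          omega
        | cons j rest =>
          refine ⟨rest, U, j, by rw [hfold']; simp [bStep], ?_, ?_⟩
          · intro k hk
            obtain ⟨ha, hb⟩ := hbd k (List.mem_cons_of_mem j hk)
            refine ⟨ha, ?_⟩
            simp
            omega
          · intro c hc
            obtain ⟨c, rfl⟩ : ∃ c', c = c' + 1 := ⟨c - 1, by omega⟩
            rw [show gRev ((l ++ [')']).reverse) (c + 1) = gRev l.reverse (c + 2) from by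
              simp [gRev]]
            rw [hg (c + 2) (by omega)]
            simp only [List.length_cons]
            by_cases hle : c + 1 ≤ rest.length
            · rw [if_pos (by omega), if_pos hle]
              simp
            · rw [if_neg (by omega), if_neg hle]
              simp
              try omega
      · refine ⟨S, U, oi, by rw [hfold']; simp [bStep, h1, h2], ?_, ?_⟩
        · intro j hj
          obtain ⟨ha, hb⟩ := hbd j hj
          refine ⟨ha, ?_⟩
          simp
          omega
        · intro c hc
          obtain ⟨c, rfl⟩ : ∃ c', c = c' + 1 := ⟨c - 1, by omega⟩
          rw [show gRev ((l ++ [x]).reverse) (c + 1) = gRev l.reverse (c + 1) from by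
            simp [gRev, h1, h2]]
          exact hg (c + 1) (by omega)

lemma slice_to_last {α : Type} (xs : List α) (a : Int) :
    PySem.List.slice xs (some a) (some ((xs.length : Int) - 1)) =
      PySem.List.slice xs (some a) (some (-1)) := by
  cases xs with
  | nil => simp [PySem.List.slice]
  | cons y ys =>
    simp [PySem.List.slice, PySem.List.clampIdx]
    split_ifs <;> omega

-- the two ports agree on any input whose stripped form is the nonempty list l ++ [z]
lemma ports_agree (input : String) (l : List Char) (z : Char)
    (hcs : (PySem.Str.strip input).toList = l ++ [z]) :
    extract_trailing_paren input = extract_trailing_paren_alt input := by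
  obtain ⟨S, U, oi, hfold, hbd, hg⟩ := stack_inv l
  have hget : PySem.List.pyGet? (l ++ [z]) (((l ++ [z]).length : Int) - 1) = some z := by
    rw [show ((l ++ [z]).length : Int) - 1 = ((l.length : Nat) : Int) from by simp]
    exact PySem.List.pyGet?_append_length l [] z
  have htake : (l ++ [z]).take ((l ++ [z]).length - 1) = l := by simp
  have haLoop : ∀ c : Nat, aLoop (l ++ [z]) c ((l ++ [z]).length - 1) = gRev l.reverse c := by
    intro c
    rw [aLoop_eq_gRev (l ++ [z]) ((l ++ [z]).length - 1) c (by omega), htake]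
  have hfold2 : (PySem.List.enumerate (l ++ [z])).foldl bStep ([], -1) =
      bStep (S, oi) ((l.length : Int), z) := by
    rw [show PySem.List.enumerate (l ++ [z]) =
          PySem.List.enumerate l ++ [((l.length : Int), z)] from by
        simpa using enumerate_append_singleton l z 0]
    rw [List.foldl_append, hfold]
    simp
  have hlast : (l ++ [z]).getLast? = some z := by simp
  unfold extract_trailing_paren extract_trailing_paren_alt
  simp only [hcs, hget, hfold2, hlast]
  by_cases hz : z = ')'
  · subst hz
    cases S with
    | nil =>
      rw [if_pos rfl, haLoop 1, hg 1 (by omega)]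
      rw [show bStep ([], oi) ((l.length : Int), ')') = ([], -1) from by simp [bStep]]
      rw [if_neg (by simp), if_neg (by simp)]
    | cons j rest =>
      obtain ⟨hj0, hjlt⟩ := hbd j List.mem_cons_self
      have hjn : ((j.toNat : Nat) : Int) = j := Int.toNat_of_nonneg hj0
      have hloc : j.toNat < (l ++ [')']).length - 1 := by
        simp only [List.length_append, List.length_cons, List.length_nil]
        omega
      rw [if_pos rfl, haLoop 1, hg 1 (by omega)]
      rw [show bStep (j :: rest, oi) ((l.length : Int), ')') = (rest, j) from by simp [bStep]]
      rw [if_pos (show 1 ≤ (j :: rest).length from by simp)]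
      simp only [show ((j :: rest)[1 - 1]?.getD 0) = j from rfl]
      rw [if_pos (⟨trivial, hloc⟩ : True ∧ j.toNat < (l ++ [')']).length - 1)]
      rw [if_pos (show l ++ [')'] ≠ [] ∧ True ∧ 0 ≤ j from ⟨by simp, trivial, hj0⟩)]
      rw [slice_to_last, hjn]
  · rw [if_neg hz]
    rw [if_neg (by simp)]
    rw [if_neg (by rintro ⟨-, h2, -⟩; exact hz (Option.some.inj h2))]

-- ===== VERDICT (by name: the statement is the Claim_ definition above) =====
theorem extract_trailing_paren_spec : Claim_equal_extract_trailing_paren := by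
  intro input _ hpre
  unfold Spec_extract_trailing_paren
  rcases List.eq_nil_or_concat ((PySem.Str.strip input).toList) with h | ⟨l, z, h⟩
  · exact absurd h hpre
  · exact ports_agree input l z (by simpa using h)
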